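-- pv_equiv track=rewrite | github.com/TheAlgorithms/Python | data_structures/stacks/postfixtoinfix.py | convert_infix
-- ===== SOURCE A (Python) =====
-- def is_operand(operator): #check wheather the character is am operator or not
-- 	return (((operator>='A') and(operator<='Z')) or ((operator>= 'a') and (operator<= 'z')))
--
-- def convert_infix(expression): #converts the expression
-- 	s = []                     #create stack to store operators
-- 	for i in expression:
-- 		if (is_operand(i)) :
-- 			s.insert(0, i)           #if encountered character is a operand it is placed in the stack.
-- 		else:	                     #else
-- 			operator1 = s[0]               #the first element is popped and storred
-- 			s.pop(0)
-- 			operator2 = s[0]               #the second element is popped and storred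
-- 			s.pop(0)
-- 			s.insert(0,"("+operator2+i+operator1+ ")")           #the operands are arranged to be in infix order around the element
--
-- 	return s[0]
-- ===== SOURCE B (Python) =====
-- def is_operand(operator):
--     return (((operator >= 'A') and (operator <= 'Z')) or ((operator >= 'a') and (operator <= 'z')))
--
-- def _render(node):
--     if len(node) == 1:
--         return node[0]
--     op, left, right = node
--     return "(" + _render(left) + op + _render(right) + ")"
--
-- def convert_infix(expression):
--     stack = []
--     for ch in expression:
--         if is_operand(ch):
--             stack.insert(0, (ch,))
--         else:
--             right = stack.pop(0)
--             left = stack.pop(0)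
--             stack.insert(0, (ch, left, right))
--     return _render(stack[0])
-- ===== Notes on version B (the rewrite author's own statement) =====
-- stated objective: alternative
-- what changed: B builds an expression tree on the stack (tuples for operands, (op,left,right) nodes for operators) and produces the infix string in a separate recursive in-order rendering pass, instead of A's concatenating parenthesized strings directly inside the stack loop.
import Mathlib
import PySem

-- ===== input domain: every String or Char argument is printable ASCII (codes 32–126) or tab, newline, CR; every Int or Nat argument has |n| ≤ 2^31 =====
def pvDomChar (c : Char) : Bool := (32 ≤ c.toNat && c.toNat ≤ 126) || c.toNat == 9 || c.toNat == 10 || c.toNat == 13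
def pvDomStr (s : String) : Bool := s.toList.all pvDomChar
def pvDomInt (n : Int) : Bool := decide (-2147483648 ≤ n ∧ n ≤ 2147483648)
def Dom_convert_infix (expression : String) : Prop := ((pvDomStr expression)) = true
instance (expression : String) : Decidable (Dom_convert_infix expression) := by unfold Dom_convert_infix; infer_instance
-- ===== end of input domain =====

-- B builds an expression tree on the stack and renders infix in a separate recursive pass,
-- instead of A's in-loop string concatenation (objective: alternative decomposition).


-- ===== PORT A =====
-- is_operand: A–Z or a–z
def pvIsOperand (c : Char) : Bool := ('A' ≤ c && c ≤ 'Z') || ('a' ≤ c && c ≤ 'z')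

-- one iteration of A's loop; the `| _ => s` branch is where Python raises IndexError (excluded by Pre_)
def pvAStep (s : List String) (c : Char) : List String :=
  if pvIsOperand c then String.singleton c :: s
  else
    match s with
    | op1 :: op2 :: rest => ("(" ++ op2 ++ String.singleton c ++ op1 ++ ")") :: rest
    | _ => s

def convert_infix (expression : String) : String :=
  match expression.toList.foldl pvAStep [] with
  | x :: _ => x
  | [] => ""    -- Python raises IndexError here (excluded by Pre_)

-- ===== PORT B =====
inductive PvNode where
  | leaf : Char → PvNode
  | node : Char → PvNode → PvNode → PvNode
deriving DecidableEq, Repr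

def pvRender : PvNode → String
  | .leaf c => String.singleton c
  | .node op l r => "(" ++ pvRender l ++ String.singleton op ++ pvRender r ++ ")"

def pvBStep (s : List PvNode) (c : Char) : List PvNode :=
  if pvIsOperand c then .leaf c :: s
  else
    match s with
    | right :: left :: rest => .node c left right :: rest
    | _ => s    -- Python raises IndexError here (excluded by Pre_)

def convert_infix_alt (expression : String) : String :=
  match expression.toList.foldl pvBStep [] with
  | n :: _ => pvRender n
  | [] => ""    -- Python raises IndexError here (excluded by Pre_)

-- ===== PRECONDITION & SPEC =====
-- Pre_ excludes exactly the inputs on which Python A raises IndexError: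
-- before each non-operand character the stack must hold at least two items
-- (operands-so-far minus operators-so-far ≥ 2), and the final stack must be nonempty.
def Pre_convert_infix (expression : String) : Prop :=
  (∀ i : Nat, i < expression.toList.length → pvIsOperand (expression.toList.getD i ' ') = false →
    2 ≤ ((expression.toList.take i).countP pvIsOperand : Int)
        - ((expression.toList.take i).countP (fun c => !pvIsOperand c) : Int)) ∧
  1 ≤ (expression.toList.countP pvIsOperand : Int)
      - (expression.toList.countP (fun c => !pvIsOperand c) : Int)
instance (expression : String) : Decidable (Pre_convert_infix expression) := by
  unfold Pre_convert_infix; infer_instance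

def pvWitness_convert_infix : String := "ab+"

def Spec_convert_infix (expression : String) (out : String) : Prop := out = convert_infix_alt expression
instance (expression : String) (out : String) : Decidable (Spec_convert_infix expression out) := by unfold Spec_convert_infix; infer_instance

-- ===== CLAIM (what is proved, stated in full; the proofs are below) =====
def Claim_equal_convert_infix : Prop := ∀ (expression : String), Dom_convert_infix expression → Pre_convert_infix expression → Spec_convert_infix expression (convert_infix expression)

-- ===== LEMMAS AND PROOFS =====
-- A's string stack is, at every step, the image of B's node stack under pvRender.
theorem pvStep_map (s : List PvNode) (c : Char) :
    pvAStep (s.map pvRender) c = (pvBStep s c).map pvRender := by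
  unfold pvAStep pvBStep
  by_cases h : pvIsOperand c = true
  · simp [h, pvRender]
  · simp only [h, Bool.false_eq_true, if_false]
    match s with
    | [] => simp
    | [x] => simp
    | r :: l :: rest => simp [pvRender]

theorem pvFold_map (cs : List Char) (s : List PvNode) :
    cs.foldl pvAStep (s.map pvRender) = (cs.foldl pvBStep s).map pvRender := by
  induction cs generalizing s with
  | nil => rfl
  | cons c cs ih => simpa [List.foldl_cons, pvStep_map] using ih (pvBStep s c)

-- ===== VERDICT (by name: the statement is the Claim_ definition above) =====
theorem convert_infix_spec : Claim_equal_convert_infix := by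
  intro expression _ _
  unfold Spec_convert_infix convert_infix convert_infix_alt
  have h := pvFold_map expression.toList []
  simp only [List.map_nil] at h
  rw [h]
  cases expression.toList.foldl pvBStep [] with
  | nil => rfl
  | cons n rest => rfl
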